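-- pv_equiv track=rewrite | github.com/IsraelRub/self.py | Tasks/Unit_7/Numbers Letters Count .py | numbers_letters_count
-- ===== SOURCE A (Python) =====
-- def numbers_letters_count(my_str):
--     my_list = [0,0]
--     for let in my_str:
--         if let.isdigit():
--             my_list[0] += 1
--         else:
--             my_list[1] += 1
--     return my_list
-- ===== SOURCE B (Python) =====
-- def numbers_letters_count(my_str):
--     # Divide and conquer: split the string in half, count each half
--     # recursively, and add the two [digits, others] pairs.
--     n = len(my_str)
--     if n == 0:
--         return [0, 0]
--     if n == 1:
--         return [1, 0] if my_str.isdigit() else [0, 1]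
--     left = numbers_letters_count(my_str[:n // 2])
--     right = numbers_letters_count(my_str[n // 2:])
--     return [left[0] + right[0], left[1] + right[1]]
-- ===== Notes on version B (the rewrite author's own statement) =====
-- stated objective: alternative
-- what changed: B replaces A's single left-to-right loop with two branch counters by a divide-and-conquer recursion: it halves the string, counts each half recursively, and adds the resulting [digits, others] pairs.
import Mathlib
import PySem

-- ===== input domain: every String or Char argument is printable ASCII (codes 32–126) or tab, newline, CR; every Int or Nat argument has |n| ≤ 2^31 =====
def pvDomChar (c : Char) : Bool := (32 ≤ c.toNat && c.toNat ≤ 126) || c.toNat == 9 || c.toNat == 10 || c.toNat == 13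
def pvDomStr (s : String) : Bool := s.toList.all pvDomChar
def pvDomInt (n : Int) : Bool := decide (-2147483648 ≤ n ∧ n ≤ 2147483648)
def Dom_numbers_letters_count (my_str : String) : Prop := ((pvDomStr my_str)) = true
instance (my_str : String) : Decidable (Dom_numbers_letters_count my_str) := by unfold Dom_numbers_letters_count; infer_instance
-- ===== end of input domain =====

-- B replaces A's single left-to-right two-counter loop by a divide-and-conquer
-- recursion that halves the string and adds the two halves' counts (objective: alternative).

-- ===== PORT A =====
-- A: my_list = [0,0]; for let in my_str: bump index 0 or 1; return my_list.
def numbers_letters_count (my_str : String) : List Int :=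
  my_str.toList.foldl
    (fun (my_list : List Int) (let_ : Char) =>
      if PySem.Chars.isdigit let_ then
        [my_list[0]! + 1, my_list[1]!]
      else
        [my_list[0]!, my_list[1]! + 1])
    [0, 0]

-- ===== PORT B =====
-- termination helper for the port's recursion (cited in decreasing_by)
theorem nlc_slice_to_len_lt (cs : List Char) (h : ¬ cs.length = 0) (h1 : ¬ cs.length = 1) :
    (PySem.List.slice cs none (some (PySem.Int.floordiv (cs.length : Int) 2))).length < cs.length := by
  rw [PySem.Int.floordiv_eq_ediv_of_pos (by omega), PySem.List.slice_to _ (by positivity),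
        show ((cs.length : Int)/2).toNat = cs.length/2 by omega]
  simp
  omega

theorem nlc_slice_from_len_lt (cs : List Char) (h : ¬ cs.length = 0) (h1 : ¬ cs.length = 1) :
    (PySem.List.slice cs (some (PySem.Int.floordiv (cs.length : Int) 2)) none).length < cs.length := by
  rw [PySem.Int.floordiv_eq_ediv_of_pos (by omega), PySem.List.slice_from _ (by positivity),
        show ((cs.length : Int)/2).toNat = cs.length/2 by omega]
  simp
  omega

-- B: n = len(my_str); base cases n ∈ {0,1}; else recurse on the two halves and add.
def nlcGo (cs : List Char) : List Int :=
  if cs.length = 0 then [0, 0]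
  else if cs.length = 1 then
    (if PySem.Chars.strIsdigit cs then [1, 0] else [0, 1])
  else
    let left := nlcGo (PySem.List.slice cs none (some (PySem.Int.floordiv (cs.length : Int) 2)))
    let right := nlcGo (PySem.List.slice cs (some (PySem.Int.floordiv (cs.length : Int) 2)) none)
    [left[0]! + right[0]!, left[1]! + right[1]!]
termination_by cs.length
decreasing_by
  · exact nlc_slice_to_len_lt cs (by assumption) (by assumption)
  · exact nlc_slice_from_len_lt cs (by assumption) (by assumption)

def numbers_letters_count_alt (my_str : String) : List Int :=
  nlcGo my_str.toList

-- ===== PRECONDITION & SPEC =====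
def Spec_numbers_letters_count (my_str : String) (out : List Int) : Prop := out = numbers_letters_count_alt my_str
instance (my_str : String) (out : List Int) : Decidable (Spec_numbers_letters_count my_str out) := by unfold Spec_numbers_letters_count; infer_instance

-- ===== CLAIM (what is proved, stated in full; the proofs are below) =====
def Claim_equal_numbers_letters_count : Prop := ∀ (my_str : String), Dom_numbers_letters_count my_str → Spec_numbers_letters_count my_str (numbers_letters_count my_str)

-- ===== LEMMAS AND PROOFS =====

-- Characterisation of B's recursion: it returns the digit / non-digit counts.
theorem nlcGo_eq (cs : List Char) :
    nlcGo cs = [(cs.countP (fun c => PySem.Chars.isdigit c) : Int),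
                (cs.countP (fun c => ¬ PySem.Chars.isdigit c = true) : Int)] := by
  induction cs using nlcGo.induct with
  | case1 cs h => rw [nlcGo]; simp_all [List.length_eq_zero_iff.mp h]
  | case2 cs h h1 hd =>
    obtain ⟨c, hc⟩ := List.length_eq_one_iff.mp h1
    subst hc
    rw [nlcGo, if_neg h, if_pos (by omega), if_pos hd]
    simp only [PySem.Chars.strIsdigit] at hd
    simp_all [List.countP_cons]
  | case3 cs h h1 hd =>
    obtain ⟨c, hc⟩ := List.length_eq_one_iff.mp h1
    subst hc
    rw [nlcGo, if_neg h, if_pos (by omega), if_neg hd]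
    simp only [PySem.Chars.strIsdigit] at hd
    simp_all [List.countP_cons]
  | case4 cs h h1 ih1 ih2 =>
    have hL : PySem.List.slice cs none (some (PySem.Int.floordiv (cs.length : Int) 2))
        = List.take (cs.length / 2) cs := by
      rw [PySem.Int.floordiv_eq_ediv_of_pos (by omega), PySem.List.slice_to _ (by positivity),
        show ((cs.length : Int)/2).toNat = cs.length/2 by omega]
    have hR : PySem.List.slice cs (some (PySem.Int.floordiv (cs.length : Int) 2))
        = List.drop (cs.length / 2) cs := by
      rw [PySem.Int.floordiv_eq_ediv_of_pos (by omega), PySem.List.slice_from _ (by positivity),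
        show ((cs.length : Int)/2).toNat = cs.length/2 by omega]
    rw [nlcGo, if_neg h, if_neg h1]
    rw [hL] at ih1
    rw [hR] at ih2
    simp only [hL, hR, ih1, ih2, List.getElem!_cons_zero, List.getElem!_cons_succ]
    have ht : cs = List.take (cs.length / 2) cs ++ List.drop (cs.length / 2) cs :=
      (List.take_append_drop _ cs).symm
    conv_rhs => rw [ht]
    push_cast [List.countP_append]
    ring_nf

-- Invariant of A's fold: starting from [a, b] it returns [a + digits, b + nondigits].
theorem pv_foldl_inv (cs : List Char) (a b : Int) :
    cs.foldl
      (fun (my_list : List Int) (let_ : Char) =>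
        if PySem.Chars.isdigit let_ then
          [my_list[0]! + 1, my_list[1]!]
        else
          [my_list[0]!, my_list[1]! + 1])
      [a, b]
    = [a + (cs.countP (fun c => PySem.Chars.isdigit c) : Int),
       b + (cs.countP (fun c => ¬ PySem.Chars.isdigit c = true) : Int)] := by
  induction cs generalizing a b with
  | nil => simp
  | cons c cs ih =>
    by_cases h : PySem.Chars.isdigit c = true
    · simp only [List.foldl_cons, if_pos h, List.getElem!_cons_zero, List.getElem!_cons_succ, ih]
      simp [List.countP_cons, h]
      ring
    · simp only [List.foldl_cons, if_neg h, List.getElem!_cons_zero, List.getElem!_cons_succ, ih]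
      simp [List.countP_cons, h]
      ring

-- ===== VERDICT (by name: the statement is the Claim_ definition above) =====
theorem numbers_letters_count_spec : Claim_equal_numbers_letters_count := by
  intro s _
  show _ = _
  rw [numbers_letters_count, numbers_letters_count_alt, pv_foldl_inv, nlcGo_eq]
  simp
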